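-- pv_equiv track=rewrite | github.com/rmourgues31/appli_rando | alti/service.py | none_clusters
-- ===== SOURCE A (Python) =====
-- def none_clusters(array: list[int]) -> dict:
--     '''
--     Extract {start_index: length} of clusters of None in an array
--     '''
--     clusters = {}
--     clustering = False
--     current_index = -1
--     length = 0
--     for i,e in enumerate(array):
--         if e is not None:
--             if clustering:
--                 clusters[current_index] = length
--             clustering = False
--             length = 0
--             continue
--         elif not clustering:
--             clustering = True
--             current_index = i
--         length += 1
--     if clustering:
--         clusters[current_index] = length
--     return clusters
-- ===== SOURCE B (Python) =====
-- def none_clusters(array: list[int]) -> dict: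
--     '''
--     Extract {start_index: length} of clusters of None in an array
--     '''
--     clusters = {}
--     i, n = 0, len(array)
--     while i < n:
--         if array[i] is None:
--             j = i + 1
--             while j < n and array[j] is None:
--                 j += 1
--             clusters[i] = j - i
--             i = j
--         else:
--             i += 1
--     return clusters
-- ===== Notes on version B (the rewrite author's own statement) =====
-- stated objective: alternative
-- what changed: Replaces A's single-pass state machine (clustering flag, current_index, length, emit-on-transition plus trailing flush) with a run-scanning index loop: on hitting a None, an inner scan finds the end of that run and records start/length at once, so no flag, pending-length state or post-loop flush exists.
import Mathlib
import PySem

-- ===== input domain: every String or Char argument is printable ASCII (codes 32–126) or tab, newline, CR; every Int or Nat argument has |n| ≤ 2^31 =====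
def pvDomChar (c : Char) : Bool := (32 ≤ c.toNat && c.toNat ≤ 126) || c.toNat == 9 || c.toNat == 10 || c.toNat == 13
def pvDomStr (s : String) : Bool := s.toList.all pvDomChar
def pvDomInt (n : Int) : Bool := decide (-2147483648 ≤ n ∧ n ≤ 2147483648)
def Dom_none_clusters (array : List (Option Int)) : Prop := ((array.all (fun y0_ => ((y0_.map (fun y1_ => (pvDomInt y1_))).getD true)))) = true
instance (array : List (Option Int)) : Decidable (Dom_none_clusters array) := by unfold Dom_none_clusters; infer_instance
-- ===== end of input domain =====

-- B replaces A's flag/pending-length state machine with a run-scanning index loop; return-value equivalence is proved (alternative decomposition, no speed claim).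

-- ===== PORT A =====
-- literal port of A's loop: state (clusters, clustering, current_index, length), index i, trailing flush
def aLoop : List (Option Int) → Int → PySem.Dict Int Int → Bool → Int → Int → PySem.Dict Int Int
  | [], _, cl, clustering, cur, len => if clustering then cl.insert cur len else cl
  | some _ :: rest, i, cl, clustering, cur, len =>
      aLoop rest (i + 1) (if clustering then cl.insert cur len else cl) false cur 0
  | none :: rest, i, cl, clustering, cur, len =>
      if clustering then aLoop rest (i + 1) cl true cur (len + 1)
      else aLoop rest (i + 1) cl true i (len + 1)

def none_clusters (array : List (Option Int)) : List (Int × Int) :=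
  (aLoop array 0 PySem.Dict.empty false (-1) 0).items

-- ===== PORT B =====
-- length of the leading run of None (B's inner 'while j < n and array[j] is None' scan)
def altRun : List (Option Int) → Nat
  | none :: rest => altRun rest + 1
  | _ => 0

-- B's outer while loop over the index
def altGo : List (Option Int) → Int → List (Int × Int)
  | [], _ => []
  | some _ :: rest, i => altGo rest (i + 1)
  | none :: rest, i =>
      let k := altRun rest + 1
      (i, (k : Int)) :: altGo (rest.drop (altRun rest)) (i + (k : Int))
termination_by xs => xs.length
decreasing_by
  · simp
  · simp [List.length_drop]

def none_clusters_alt (array : List (Option Int)) : List (Int × Int) :=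
  altGo array 0

-- ===== PRECONDITION & SPEC =====
def Spec_none_clusters (array : List (Option Int)) (out : List (Int × Int)) : Prop := out = none_clusters_alt array
instance (array : List (Option Int)) (out : List (Int × Int)) : Decidable (Spec_none_clusters array out) := by unfold Spec_none_clusters; infer_instance

-- ===== CLAIM (what is proved, stated in full; the proofs are below) =====
def Claim_equal_none_clusters : Prop := ∀ (array : List (Option Int)), Dom_none_clusters array → Spec_none_clusters array (none_clusters array)

-- ===== LEMMAS AND PROOFS =====

lemma not_contains_of_lt (cl : PySem.Dict Int Int) (c : Int)
    (h : ∀ k ∈ cl.keys, k < c) : cl.contains c = false := by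
  rw [PySem.Dict.contains_eq_decide_mem_keys]
  simp only [decide_eq_false_iff_not]
  intro hm
  exact absurd (h c hm) (lt_irrefl c)

lemma loop_eq (rest : List (Option Int)) :
    (∀ (i cur : Int) (cl : PySem.Dict Int Int), cl.keys.Nodup → (∀ k ∈ cl.keys, k < i) →
       (aLoop rest i cl false cur 0).items = cl.items ++ altGo rest i) ∧
    (∀ (i cur len : Int) (cl : PySem.Dict Int Int), cl.keys.Nodup → (∀ k ∈ cl.keys, k < cur) → cur < i →
       (aLoop rest i cl true cur len).items =
         cl.items ++ (cur, len + (altRun rest : Int)) ::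
           altGo (rest.drop (altRun rest)) (i + (altRun rest : Int))) := by
  induction rest with
  | nil =>
      constructor
      · intro i cur cl _ _
        simp [aLoop, altGo]
      · intro i cur len cl hnd hlt _
        simp [aLoop, altGo, altRun,
          PySem.Dict.items_insert_of_not_contains cl len (not_contains_of_lt cl cur hlt)]
  | cons e rest ih =>
      constructor
      · intro i cur cl hnd hlt
        match e with
        | some v =>
            rw [show aLoop (some v :: rest) i cl false cur 0
                  = aLoop rest (i + 1) cl false cur 0 from rfl]
            rw [(ih).1 (i + 1) cur cl hnd (fun k hk => lt_trans (hlt k hk) (by omega))]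
            simp [altGo]
        | none =>
            rw [show aLoop (none :: rest) i cl false cur 0
                  = aLoop rest (i + 1) cl true i (0 + 1) from rfl]
            rw [(ih).2 (i + 1) i (0 + 1) cl hnd hlt (by omega)]
            simp [altGo, altRun]
            constructor
            · ring
            · congr 1; ring
      · intro i cur len cl hnd hlt hci
        match e with
        | some v =>
            rw [show aLoop (some v :: rest) i cl true cur len
                  = aLoop rest (i + 1) (cl.insert cur len) false cur 0 from rfl]
            have hc : cl.contains cur = false := not_contains_of_lt cl cur hlt
            have hnd' : (cl.insert cur len).keys.Nodup := PySem.Dict.nodup_keys_insert cl cur len hnd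
            have hlt' : ∀ k ∈ (cl.insert cur len).keys, k < i + 1 := by
              intro k hk
              rw [PySem.Dict.keys_insert_of_not_contains cl len hc] at hk
              rcases List.mem_append.mp hk with h | h
              · exact lt_trans (hlt k h) (by omega)
              · simp at h; omega
            rw [(ih).1 (i + 1) cur _ hnd' hlt']
            rw [PySem.Dict.items_insert_of_not_contains cl len hc]
            simp [altGo, altRun]
        | none =>
            rw [show aLoop (none :: rest) i cl true cur len
                  = aLoop rest (i + 1) cl true cur (len + 1) from rfl]
            rw [(ih).2 (i + 1) cur (len + 1) cl hnd hlt (by omega)]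
            simp [altRun]
            constructor
            · ring
            · congr 1; ring

-- ===== VERDICT (by name: the statement is the Claim_ definition above) =====
theorem none_clusters_spec : Claim_equal_none_clusters := by
  intro array _
  unfold Spec_none_clusters none_clusters none_clusters_alt
  rw [(loop_eq array).1 0 (-1) PySem.Dict.empty (by simp [PySem.Dict.empty])
        (by simp [PySem.Dict.empty, PySem.Dict.keys])]
  simp [PySem.Dict.empty]
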